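-- pv_equiv track=rewrite | github.com/alvis1113/citationManager | app.py | process_given_name
-- ===== SOURCE A (Python) =====
-- def process_given_name(given_name):
--     """
--     given nameを適切に処理する
--     - スペースで分割
--     - 小文字で始まるパート（例: 'von'）: そのまま保持
--     - 大文字のみのパート（例: 'CS', 'AV'）: イニシャル化 ('C. S.', 'A. V.')
--     - 大文字小文字混合のパート（例: 'Bartheld'）: 最初に現れたものにカンマを付ける
--
--     例:
--     'Bartheld CS' -> 'Bartheld, C. S.'
--     'von Bartheld CS' -> 'von Bartheld, C. S.'
--     'AV' -> 'A. V.'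
--     'John Paul GP' -> 'John, Paul G. P.'
--     """
--     if not given_name:
--         return ""
--
--     # スペースで分割
--     parts = given_name.split()
--     processed_parts = []
--     comma_inserted = False
--
--     for part in parts:
--         if not part:
--             continue
--
--         # 小文字で始まる場合（例: 'von', 'de', 'van'など）
--         if part[0].islower():
--             processed_parts.append(part)
--         # 大文字のみで構成されているかチェック
--         elif part.isupper() and part.isalpha():
--             # カンマがまだ挿入されていない場合、最後の混合パートの後に挿入
--             if not comma_inserted and processed_parts:
--                 # 最後の要素にカンマを追加
--                 processed_parts[-1] = processed_parts[-1] + ','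
--                 comma_inserted = True
--             # イニシャル化: 'CS' -> 'C. S.'
--             initials = '. '.join(list(part)) + '.'
--             processed_parts.append(initials)
--         else:
--             # 大文字小文字混合の場合
--             processed_parts.append(part)
--
--     # 最後まで混合パートが見つからなかった場合（全てイニシャルの場合）
--     # または最後のパートが混合の場合、カンマは不要
--
--     return ' '.join(processed_parts)
-- ===== SOURCE B (Python) =====
-- def process_given_name(given_name):
--     if not given_name:
--         return ""
--
--     def caps(p):
--         return p.isupper() and p.isalpha()
--
--     def fmt(p):
--         return '. '.join(p) + '.' if caps(p) else p
--
--     parts = given_name.split()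
--     if not parts:
--         return ""
--     head, tail = parts[0], parts[1:]
--     # peel the segment of non-initials parts after the head off the front of tail
--     before = []
--     while tail and not caps(tail[0]):
--         before.append(tail[0])
--         tail = tail[1:]
--     seg = [fmt(head)] + before
--     if tail:  # an initials block follows the segment: the comma sits at the segment's end
--         seg = seg[:-1] + [seg[-1] + ',']
--     return ' '.join(seg + [fmt(p) for p in tail])
-- ===== Notes on version B (the rewrite author's own statement) =====
-- stated objective: alternative
-- what changed: A's single stateful loop (accumulator + comma_inserted flag, in-place mutation of the last collected element) is replaced by a segment decomposition: format the head, peel the span of non-initials parts off the tail, attach the comma at the segment boundary if an initials block follows, and map the formatter over the remainder.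
import Mathlib
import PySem

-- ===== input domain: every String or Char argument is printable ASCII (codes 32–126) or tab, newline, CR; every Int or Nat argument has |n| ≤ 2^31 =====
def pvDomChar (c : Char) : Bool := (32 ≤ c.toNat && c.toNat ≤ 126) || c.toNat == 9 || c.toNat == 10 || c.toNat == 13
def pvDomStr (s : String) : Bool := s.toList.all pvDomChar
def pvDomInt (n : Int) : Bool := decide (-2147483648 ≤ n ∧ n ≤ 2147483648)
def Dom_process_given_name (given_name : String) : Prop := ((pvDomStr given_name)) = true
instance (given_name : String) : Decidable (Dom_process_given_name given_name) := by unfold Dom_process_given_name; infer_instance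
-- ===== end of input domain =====

-- B replaces A's single stateful loop (accumulator + comma_inserted flag, in-place mutation of the
-- last collected element) by a segment decomposition: format the head, peel the span of
-- non-initials parts off the tail, patch the comma once at the segment boundary, map the rest.

-- shared primitives of both Pythons --------------------------------------------------------------
-- Python str.isupper(): at least one cased character and no lowercase one; exact on the ASCII
-- domain, where the cased characters are exactly the letters (hand-ported: PySem has no strIsupper).
def pgnIsUpperStr (p : List Char) : Bool :=
  p.any PySem.Chars.isupper && !(p.any PySem.Chars.islower)

-- part.isupper() and part.isalpha()
def pgnIsInit (p : List Char) : Bool := pgnIsUpperStr p && PySem.Chars.strIsalpha p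

-- '. '.join(list(part)) + '.'
def pgnInitials (p : List Char) : List Char :=
  PySem.Chars.join ['.', ' '] (p.map (fun c => [c])) ++ ['.']

-- xs[:-1] + [xs[-1] + ','] — A writes it as 'processed_parts[-1] = processed_parts[-1] + ","',
-- B as 'seg = seg[:-1] + [seg[-1] + ","]'; both are this on a nonempty list
def pgnPatch (xs : List (List Char)) : List (List Char) :=
  xs.dropLast ++ [PySem.List.pyGetD xs (-1) [] ++ [',']]

-- ===== PORT A =====
-- the loop body of A: state = (processed_parts, comma_inserted)
def pgnStepA (st : List (List Char) × Bool) (part : List Char) : List (List Char) × Bool :=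
  if part = [] then st                                       -- if not part: continue
  else if (match part with | c :: _ => PySem.Chars.islower c | [] => false) then
    (st.1 ++ [part], st.2)                                   -- part[0].islower()
  else if pgnIsInit part then
    let st1 :=
      if !st.2 && !st.1.isEmpty then (pgnPatch st.1, true)   -- comma on the last collected element
      else st
    (st1.1 ++ [pgnInitials part], st1.2)
  else (st.1 ++ [part], st.2)

def process_given_name (given_name : String) : String :=
  if given_name.toList = [] then ""                          -- if not given_name: return ""
  else
    let parts := PySem.Chars.split₀ given_name.toList        -- given_name.split()
    String.ofList (PySem.Chars.join [' '] (parts.foldl pgnStepA ([], false)).1)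

-- ===== PORT B =====
-- fmt(p) = '. '.join(p) + '.' if caps(p) else p
def pgnFmt (p : List Char) : List Char := if pgnIsInit p then pgnInitials p else p

-- the while loop 'while tail and not caps(tail[0]): before.append(tail[0]); tail = tail[1:]'
-- returning (before, tail)
def pgnSpan : List (List Char) → List (List Char) × List (List Char)
  | [] => ([], [])
  | p :: rest =>
    if pgnIsInit p then ([], p :: rest)
    else
      let (b, t) := pgnSpan rest
      (p :: b, t)

def process_given_name_alt (given_name : String) : String :=
  if given_name.toList = [] then ""
  else
    match PySem.Chars.split₀ given_name.toList with
    | [] => ""                                               -- if not parts: return ""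
    | head :: tail0 =>
      let (before, tail) := pgnSpan tail0
      let seg := pgnFmt head :: before                       -- [fmt(head)] + before
      let seg := if tail.isEmpty then seg else pgnPatch seg  -- if tail: seg = seg[:-1]+[seg[-1]+',']
      String.ofList (PySem.Chars.join [' '] (seg ++ tail.map pgnFmt))

-- ===== PRECONDITION & SPEC =====
def Spec_process_given_name (given_name : String) (out : String) : Prop := out = process_given_name_alt given_name
instance (given_name : String) (out : String) : Decidable (Spec_process_given_name given_name out) := by unfold Spec_process_given_name; infer_instance

-- ===== CLAIM (what is proved, stated in full; the proofs are below) =====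
def Claim_equal_process_given_name : Prop := ∀ (given_name : String), Dom_process_given_name given_name → Spec_process_given_name given_name (process_given_name given_name)

-- ===== LEMMAS AND PROOFS =====

-- every part produced by str.split() is nonempty
lemma pgn_split₀_go_ne_nil (s cur : List Char) (acc : List (List Char))
    (h : ∀ p ∈ acc, p ≠ []) : ∀ p ∈ PySem.Chars.split₀.go s cur acc, p ≠ [] := by
  induction s generalizing cur acc with
  | nil =>
    intro p hp
    unfold PySem.Chars.split₀.go at hp
    split at hp
    · exact h p (List.mem_reverse.mp hp)
    · rename_i hcur
      rw [List.mem_reverse, List.mem_cons] at hp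
      rcases hp with rfl | hp'
      · simpa [List.isEmpty_iff] using hcur
      · exact h _ hp'
  | cons c rest ih =>
    intro p hp
    unfold PySem.Chars.split₀.go at hp
    split at hp
    · split at hp
      · exact ih [] acc h p hp
      · rename_i hcur
        refine ih [] (cur.reverse :: acc) ?_ p hp
        intro q hq
        rcases List.mem_cons.mp hq with rfl | hq'
        · simpa [List.isEmpty_iff] using hcur
        · exact h q hq'
    · exact ih (c :: cur) acc h p hp

lemma pgn_split₀_ne_nil (s : List Char) : ∀ p ∈ PySem.Chars.split₀ s, p ≠ [] := by
  unfold PySem.Chars.split₀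
  exact pgn_split₀_go_ne_nil s [] [] (by simp)

-- a part whose first character is lowercase is never an initials block
lemma pgn_isInit_lower (c : Char) (cs : List Char) (h : PySem.Chars.islower c = true) :
    pgnIsInit (c :: cs) = false := by
  simp [pgnIsInit, pgnIsUpperStr, h]

-- A's step on a nonempty part, written through pgnIsInit only
lemma pgn_stepA_eq (st : List (List Char) × Bool) (p : List Char) (hp : p ≠ []) :
    pgnStepA st p =
      if pgnIsInit p then
        (let st1 := if !st.2 && !st.1.isEmpty then (pgnPatch st.1, true) else st
         (st1.1 ++ [pgnInitials p], st1.2))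
      else (st.1 ++ [p], st.2) := by
  match p with
  | c :: cs =>
    by_cases hl : PySem.Chars.islower c = true
    · simp [pgnStepA, hl, pgn_isInit_lower c cs hl]
    · simp [pgnStepA, hl]

-- once the comma flag is set, the loop is a plain map
lemma pgn_fold_true (l : List (List Char)) (pp : List (List Char))
    (hne : ∀ p ∈ l, p ≠ []) :
    l.foldl pgnStepA (pp, true) = (pp ++ l.map pgnFmt, true) := by
  induction l generalizing pp with
  | nil => simp
  | cons p l ih =>
    have hp : p ≠ [] := hne p (by simp)
    have hl : ∀ q ∈ l, q ≠ [] := fun q hq => hne q (by simp [hq])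
    simp only [List.foldl_cons, pgn_stepA_eq _ p hp]
    by_cases hi : pgnIsInit p = true
    · simp [hi, ih _ hl, pgnFmt]
    · simp [hi, ih _ hl, pgnFmt]

-- the loop from a nonempty accumulator with the flag unset, characterised by pgnSpan:
-- the span prefix is appended untouched; at the first initials part the accumulated list is
-- patched and the remainder is mapped
lemma pgn_fold_false (l : List (List Char)) (pp : List (List Char))
    (hpp : pp ≠ []) (hne : ∀ p ∈ l, p ≠ []) :
    l.foldl pgnStepA (pp, false) =
      match pgnSpan l with
      | (b, []) => (pp ++ b, false)
      | (b, t) => (pgnPatch (pp ++ b) ++ t.map pgnFmt, true) := by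
  induction l generalizing pp with
  | nil => simp [pgnSpan]
  | cons p l ih =>
    have hp : p ≠ [] := hne p (by simp)
    have hl : ∀ q ∈ l, q ≠ [] := fun q hq => hne q (by simp [hq])
    simp only [List.foldl_cons, pgn_stepA_eq _ p hp]
    by_cases hi : pgnIsInit p = true
    · -- first initials part: the comma fires here, the rest of the loop is a map
      have hppE : pp.isEmpty = false := by simp [hpp]
      simp only [hi, hppE, Bool.not_false, Bool.and_self, if_pos]
      rw [pgn_fold_true l _ hl]
      simp [pgnSpan, hi, pgnFmt]
    · -- non-initials part: appended unchanged, it joins the span prefix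
      simp only [hi, Bool.false_eq_true, reduceIte]
      rw [ih (pp ++ [p]) (by simp) hl]
      simp only [pgnSpan, hi, Bool.false_eq_true, reduceIte]
      cases hsp : pgnSpan l with
      | mk b t =>
        cases t with
        | nil => simp
        | cons t0 ts => simp

-- ===== VERDICT (by name: the statement is the Claim_ definition above) =====
theorem process_given_name_spec : Claim_equal_process_given_name := by
  intro given_name _
  unfold Spec_process_given_name process_given_name process_given_name_alt
  by_cases h0 : given_name.toList = []
  · simp [h0]
  · simp only [h0, reduceIte]
    have hne := pgn_split₀_ne_nil given_name.toList
    cases hparts : PySem.Chars.split₀ given_name.toList with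
    | nil => simp [pysem]
    | cons p0 rest =>
      rw [hparts] at hne
      have hp0 : p0 ≠ [] := hne p0 (by simp)
      have hrest : ∀ q ∈ rest, q ≠ [] := fun q hq => hne q (by simp [hq])
      -- A's first iteration: the accumulator is empty, so no comma yet
      have hfirst : pgnStepA ([], false) p0 = ([pgnFmt p0], false) := by
        rw [pgn_stepA_eq _ p0 hp0]
        by_cases hi : pgnIsInit p0 = true <;> simp [hi, pgnFmt]
      rw [List.foldl_cons, hfirst, pgn_fold_false rest [pgnFmt p0] (by simp) hrest]
      cases hsp : pgnSpan rest with
      | mk b t =>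
        cases t with
        | nil => simp [hsp]
        | cons t0 ts => simp [hsp]
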